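-- pv_equiv track=rewrite | github.com/zhuli19901106/leetcode-zhuli | find-and-replace-pattern_1_AC.py | getPerm
-- ===== SOURCE A (Python) =====
-- def getPerm(s):
--     m = {}
--     res = []
--     i = 0
--     for c in s:
--         if not c in m:
--             m[c] = i
--             i += 1
--         res.append(m[c])
--     return res
-- ===== SOURCE B (Python) =====
-- def getPerm(s):
--     # first-occurrence rank of c = number of distinct chars strictly before c's first occurrence
--     return [len(set(s[:s.index(c)])) for c in s]
-- ===== Notes on version B (the rewrite author's own statement) =====
-- stated objective: alternative
-- what changed: B drops A's dict-and-counter loop entirely: each character's code is computed independently as the number of distinct characters in the prefix strictly before that character's first occurrence (len(set(s[:s.index(c)]))), a per-element prefix-distinct count instead of stateful lazy index assignment.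
import Mathlib
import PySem

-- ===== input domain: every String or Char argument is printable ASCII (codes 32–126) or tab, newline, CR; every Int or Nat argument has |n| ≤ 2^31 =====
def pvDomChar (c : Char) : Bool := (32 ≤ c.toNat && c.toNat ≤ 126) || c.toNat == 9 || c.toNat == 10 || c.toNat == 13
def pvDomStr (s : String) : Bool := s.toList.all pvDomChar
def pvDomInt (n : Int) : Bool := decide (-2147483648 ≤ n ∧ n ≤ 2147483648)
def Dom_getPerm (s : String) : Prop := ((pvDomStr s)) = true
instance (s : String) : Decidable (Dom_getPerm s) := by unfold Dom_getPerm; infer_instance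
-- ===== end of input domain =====

-- ===== PORT A =====
-- B computes each character's code independently as the distinct-count of the prefix
-- before its first occurrence, instead of A's stateful dict-and-counter loop; objective: alternative.

-- A's loop: for c in s: if c not in m: m[c] = i; i += 1; res.append(m[c])
def getPermLoop : List Char → PySem.Dict Char Int → Int → List Int → List Int
  | [], _, _, res => res
  | c :: cs, m, i, res =>
    if m.contains c then
      getPermLoop cs m i (res ++ [m.getD c 0])
    else
      getPermLoop cs (m.insert c i) (i + 1) (res ++ [(m.insert c i).getD c 0])

def getPerm (s : String) : List Int := getPermLoop s.toList PySem.Dict.empty 0 []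

-- ===== PORT B =====
-- len(set(s[:s.index(c)])); s.index(c) never raises here since c is drawn from s itself
def prefixRank (l : List Char) (c : Char) : Int :=
  match PySem.List.index? l c with
  | some k => (PySem.Set.len (PySem.Set.ofList (PySem.List.slice l none (some (k : Int)))) : Int)
  | none => 0   -- unreachable: c ∈ l (Python would raise ValueError)

def getPerm_alt (s : String) : List Int := s.toList.map (prefixRank s.toList)

-- ===== PRECONDITION & SPEC =====
def Spec_getPerm (s : String) (out : List Int) : Prop := out = getPerm_alt s
instance (s : String) (out : List Int) : Decidable (Spec_getPerm s out) := by unfold Spec_getPerm; infer_instance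

-- ===== CLAIM (what is proved, stated in full; the proofs are below) =====
def Claim_equal_getPerm : Prop := ∀ (s : String), Dom_getPerm s → Spec_getPerm s (getPerm s)

-- ===== LEMMAS AND PROOFS =====

-- ded l = first-occurrence list (set built left to right)
def ded (l : List Char) : List Char := l.foldl PySem.Set.add []

-- buildIdx-style table for A's loop state: dict mapping each seen char to its rank
def buildIdx (order : List Char) : PySem.Dict Char Int :=
  (PySem.List.enumerate order).foldl (fun d p => d.insert p.2 p.1) PySem.Dict.empty

lemma buildIdx_append (seen : List Char) (c : Char) :
    buildIdx (seen ++ [c]) = (buildIdx seen).insert c (seen.length : Int) := by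
  simp [buildIdx, PySem.List.enumerate_append, List.foldl_append, PySem.List.enumerate_cons]

lemma buildIdx_contains (seen : List Char) (c : Char) :
    (buildIdx seen).contains c = decide (c ∈ seen) := by
  induction seen using List.reverseRecOn with
  | nil => simp [buildIdx, PySem.List.enumerate_nil, PySem.Dict.contains_empty]
  | append_singleton xs x ih =>
      rw [buildIdx_append, PySem.Dict.contains_insert, ih]
      by_cases h : c = x <;> simp [h]

lemma buildIdx_getD (seen : List Char) (hnd : seen.Nodup) (c : Char) (hc : c ∈ seen) :
    (buildIdx seen).getD c 0 = ((seen.idxOf c : Nat) : Int) := by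
  induction seen using List.reverseRecOn with
  | nil => cases hc
  | append_singleton xs x ih =>
      rw [buildIdx_append]
      rcases List.mem_append.mp hc with h | h
      · have hne : c ≠ x := by
          rintro rfl
          exact (List.disjoint_of_nodup_append hnd) h (List.mem_singleton_self _)
        rw [PySem.Dict.getD_insert, if_neg hne,
          ih (List.Nodup.of_append_left hnd) h, List.idxOf_append_of_mem h]
      · rcases List.mem_singleton.mp h with rfl
        have hnx : c ∉ xs := fun hmem =>
          (List.disjoint_of_nodup_append hnd) hmem (List.mem_singleton_self _)
        rw [PySem.Dict.getD_insert_self]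
        simp [List.idxOf_append, hnx]

-- the first-occurrence accumulator only appends, so indices of seen chars are stable
lemma foldl_add_prefix (cs seen : List Char) :
    ∃ t, cs.foldl PySem.Set.add seen = seen ++ t ∧ ∀ x ∈ t, x ∉ seen := by
  induction cs generalizing seen with
  | nil => exact ⟨[], by simp⟩
  | cons c cs ih =>
      by_cases hc : c ∈ seen
      · simpa [List.foldl_cons, PySem.Set.add_of_mem hc] using ih seen
      · rcases ih (seen ++ [c]) with ⟨t, ht, hdisj⟩
        refine ⟨c :: t, ?_, ?_⟩
        · simp [List.foldl_cons, PySem.Set.add_of_not_mem hc, ht]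
        · intro x hx
          rcases List.mem_cons.mp hx with rfl | hx
          · exact hc
          · intro hmem
            exact hdisj x hx (List.mem_append_left _ hmem)

lemma idxOf_foldl_add (cs seen : List Char) (c : Char) (hc : c ∈ seen) :
    (cs.foldl PySem.Set.add seen).idxOf c = seen.idxOf c := by
  rcases foldl_add_prefix cs seen with ⟨t, ht, -⟩
  rw [ht, List.idxOf_append_of_mem hc]

-- main loop invariant: A's loop over cs with state (buildIdx seen, |seen|) produces
-- the first-occurrence indices w.r.t. the final accumulator
lemma getPermLoop_eq (cs : List Char) : ∀ (seen : List Char) (res : List Int),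
    seen.Nodup →
    getPermLoop cs (buildIdx seen) (seen.length : Int) res
      = res ++ cs.map (fun c => (((cs.foldl PySem.Set.add seen).idxOf c : Nat) : Int)) := by
  induction cs with
  | nil => intro seen res _; simp [getPermLoop]
  | cons c cs ih =>
      intro seen res hnd
      by_cases hc : c ∈ seen
      · rw [getPermLoop, if_pos (by simp [buildIdx_contains, hc]),
          ih seen _ hnd,
          buildIdx_getD seen hnd c hc]
        simp [List.foldl_cons, PySem.Set.add_of_mem hc,
          idxOf_foldl_add cs seen c hc, List.append_assoc]
      · have hnd' : (seen ++ [c]).Nodup := by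
          simpa [PySem.Set.add_of_not_mem hc] using PySem.Set.nodup_add seen c hnd
        rw [getPermLoop, if_neg (by simp [buildIdx_contains, hc]),
          ← buildIdx_append seen c]
        have hlen : ((seen.length : Int) + 1) = (((seen ++ [c]).length : Nat) : Int) := by
          simp
        rw [hlen, ih (seen ++ [c]) _ hnd',
          buildIdx_append seen c, PySem.Dict.getD_insert_self]
        have hidx : ((cs.foldl PySem.Set.add (seen ++ [c])).idxOf c : Nat) = seen.length := by
          rw [idxOf_foldl_add cs (seen ++ [c]) c (by simp)]
          simp [List.idxOf_append, hc]
        simp [List.foldl_cons, PySem.Set.add_of_not_mem hc, hidx, List.append_assoc]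

-- A's result: first-occurrence index of each char in ded l
lemma getPerm_eq (s : String) :
    getPerm s = s.toList.map (fun c => (((ded s.toList).idxOf c : Nat) : Int)) := by
  have h := getPermLoop_eq s.toList [] [] List.nodup_nil
  simpa [getPerm, ded, buildIdx, PySem.List.enumerate_nil] using h

-- B's per-character value agrees with A's rank, for c ∈ l
lemma prefixRank_eq (l : List Char) (c : Char) (hc : c ∈ l) :
    prefixRank l c = (((ded l).idxOf c : Nat) : Int) := by
  obtain ⟨k, hk⟩ := (PySem.List.index?_isSome_iff (xs := l) (v := c)).mpr hc
    |> Option.isSome_iff_exists.mp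
  obtain ⟨pre, suf, hsplit, hlen, hpre⟩ := (PySem.List.index?_eq_some_iff _ _ _).mp hk
  have htake : PySem.List.slice l none (some (k : Int)) = pre := by
    rw [PySem.List.slice_to_natCast, hsplit, ← hlen]
    simp
  have hdedl : ∃ t, ded l = (ded pre ++ [c]) ++ t := by
    have hcpre : c ∉ ded pre := by
      intro hm
      exact hpre ((PySem.Set.mem_ofList pre c).mp (by simpa [PySem.Set.ofList_eq_foldl, ded] using hm))
    have : ded l = suf.foldl PySem.Set.add (ded pre ++ [c]) := by
      simp only [ded, hsplit, List.foldl_append, List.foldl_cons]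
      rw [PySem.Set.add_of_not_mem (by simpa [ded] using hcpre)]
    rcases foldl_add_prefix suf (ded pre ++ [c]) with ⟨t, ht, -⟩
    exact ⟨t, by rw [this, ht]⟩
  rcases hdedl with ⟨t, ht⟩
  have hcpre : c ∉ ded pre := by
    intro hm
    exact hpre ((PySem.Set.mem_ofList pre c).mp (by simpa [PySem.Set.ofList_eq_foldl, ded] using hm))
  have hidx : (ded l).idxOf c = (ded pre).length := by
    rw [ht, List.idxOf_append_of_mem (by simp)]
    simp [List.idxOf_append, hcpre]
  simp only [prefixRank, hk]
  rw [htake, hidx]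
  simp [PySem.Set.len, PySem.Set.ofList_eq_foldl, ded]

-- ===== VERDICT (by name: the statement is the Claim_ definition above) =====
theorem getPerm_spec : Claim_equal_getPerm := by
  intro s _
  show getPerm s = getPerm_alt s
  rw [getPerm_eq, getPerm_alt]
  exact List.map_congr_left fun c hc => (prefixRank_eq s.toList c hc).symm
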